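-- pv_equiv track=rewrite | github.com/matthewjaykoster/Celeste-LevelData-Parser | scripts/generate_location_paths.py | calculateReachableRoomsForDestination
-- ===== SOURCE A (Python) =====
-- from collections import defaultdict, deque
-- from typing import Any, Dict, Iterator, List, Optional, Tuple, TypeVar
--
-- def calculateReachableRoomsForDestination(
--     destinationRoomName: str, reverseGraph: defaultdict[str, List[str]]
-- ) -> set[str]:
--     """Determines which rooms can possibly reach a given destination via Breadth First Search.
--
--     Args:
--         destinationRoomName (str): The destination to reach.
--         reverseGraph (defaultdict[str, List[str]]): A reverse connection graph for a level (see buildReverseConnectionGraph())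
--
--     Returns:
--         _type_: _description_
--     """
--     reachableRoomsForDestination: set[str] = set()
--     queue = [destinationRoomName]
--     while queue:
--         room = queue.pop()
--         if room in reachableRoomsForDestination:
--             continue
--         reachableRoomsForDestination.add(room)
--         for prevRoom in reverseGraph.get(room, []):
--             queue.append(prevRoom)
--     return reachableRoomsForDestination
-- ===== SOURCE B (Python) =====
-- def calculateReachableRoomsForDestination(destinationRoomName, reverseGraph):
--     """Recursive DFS over the reverse graph; the visited set doubles as the result.
--
--     Predecessors are visited right-to-left (same visit order as A's stack pop);
--     for the returned set the order is immaterial.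
--     """
--     reachableRoomsForDestination = set()
--
--     def visit(room):
--         if room in reachableRoomsForDestination:
--             return
--         reachableRoomsForDestination.add(room)
--         for prevRoom in reversed(reverseGraph.get(room, [])):
--             visit(prevRoom)
--
--     visit(destinationRoomName)
--     return reachableRoomsForDestination
-- ===== Notes on version B (the rewrite author's own statement) =====
-- stated objective: alternative
-- what changed: Replaces the explicit worklist/stack loop with a recursive DFS helper that shares one accumulated visited set (predecessors visited right-to-left, the same visit order as A's stack pop; immaterial for the returned set).
import Mathlib
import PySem

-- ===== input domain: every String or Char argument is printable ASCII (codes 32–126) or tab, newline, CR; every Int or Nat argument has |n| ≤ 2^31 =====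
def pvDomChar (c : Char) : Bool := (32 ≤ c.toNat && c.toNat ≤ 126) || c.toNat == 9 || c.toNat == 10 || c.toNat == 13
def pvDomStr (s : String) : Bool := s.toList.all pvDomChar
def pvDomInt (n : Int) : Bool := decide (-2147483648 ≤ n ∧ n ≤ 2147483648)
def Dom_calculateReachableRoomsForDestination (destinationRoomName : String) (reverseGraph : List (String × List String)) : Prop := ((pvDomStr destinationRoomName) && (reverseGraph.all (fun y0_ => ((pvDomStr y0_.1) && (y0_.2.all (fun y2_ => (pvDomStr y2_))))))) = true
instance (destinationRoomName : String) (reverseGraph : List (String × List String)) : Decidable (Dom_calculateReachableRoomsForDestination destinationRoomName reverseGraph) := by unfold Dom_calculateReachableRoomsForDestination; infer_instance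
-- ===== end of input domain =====

-- B replaces A's explicit stack loop by a recursive DFS sharing one visited set; same returned set, same insertion order.

-- ===== PORT A =====
-- reverseGraph.get(room, [])
def pvPreds (reverseGraph : List (String × List String)) (room : String) : List String :=
  (PySem.Dict.mk reverseGraph).getD room []

-- the finite universe every room ever pushed belongs to (termination scaffolding only)
def pvU (destinationRoomName : String) (reverseGraph : List (String × List String)) : List String :=
  destinationRoomName :: reverseGraph.flatMap (fun p => p.2)

theorem pvPreds_sub (reverseGraph : List (String × List String)) (room : String) :
    ∀ x ∈ pvPreds reverseGraph room, x ∈ reverseGraph.flatMap (fun p => p.2) := by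
  induction reverseGraph with
  | nil => intro x hx; simp [pvPreds, PySem.Dict.getD, PySem.Dict.get?] at hx
  | cons p t ih =>
      intro x hx
      rw [pvPreds, PySem.Dict.getD_eq_get?_getD] at hx
      rcases p with ⟨k, v⟩
      rw [PySem.Dict.get?_mk_cons] at hx
      by_cases hk : k == room
      · simp [hk] at hx
        exact List.mem_flatMap.mpr ⟨(k, v), List.mem_cons_self, hx⟩
      · simp [hk] at hx
        have := ih x (by rw [pvPreds, PySem.Dict.getD_eq_get?_getD]; exact hx)
        simp only [List.flatMap_cons]
        exact List.mem_append_right _ this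

theorem pv_length_filter_le {α : Type} (l : List α) (p q : α → Bool)
    (h : ∀ x, q x = true → p x = true) : (l.filter q).length ≤ (l.filter p).length := by
  induction l with
  | nil => simp
  | cons a t ih =>
      simp only [List.filter_cons]
      cases hq : q a
      · cases hp : p a <;> simp <;> omega
      · rw [h a hq]; simpa using ih

theorem pv_length_filter_lt {α : Type} (l : List α) (p q : α → Bool)
    (h : ∀ x, q x = true → p x = true) (x : α) (hx : x ∈ l)
    (hpx : p x = true) (hqx : q x = false) :
    (l.filter q).length < (l.filter p).length := by
  induction l with
  | nil => cases hx
  | cons a t ih =>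
      simp only [List.filter_cons]
      rcases List.mem_cons.mp hx with rfl | hxt
      · rw [hpx, hqx]
        simpa using Nat.lt_succ_of_le (pv_length_filter_le t p q h)
      · have := ih hxt
        cases hq : q a
        · cases hp : p a <;> simp <;> omega
        · rw [h a hq]; simpa using this

-- key fact for termination: adding an unvisited room of U shrinks the unvisited part of U
theorem pv_filter_add_lt (U S : List String) (room : String)
    (hU : room ∈ U) (hS : room ∉ S) :
    (U.filter (fun r => decide (r ∉ PySem.Set.add S room))).length <
      (U.filter (fun r => decide (r ∉ S))).length := by
  refine pv_length_filter_lt U _ _ ?_ room hU (by simpa using hS) ?_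
  · intro x hx
    simp only [decide_eq_true_eq] at hx ⊢
    intro hxS; exact hx ((PySem.Set.mem_add _ _ _).mpr (Or.inl hxS))
  · simp [PySem.Set.mem_add]

theorem pv_filter_le_of_sub (U S S' : List String) (h : ∀ x ∈ S, x ∈ S') :
    (U.filter (fun r => decide (r ∉ S'))).length ≤ (U.filter (fun r => decide (r ∉ S))).length := by
  refine pv_length_filter_le U _ _ ?_
  intro x hx
  simp only [decide_eq_true_eq] at hx ⊢
  intro hxS; exact hx (h x hxS)

-- A's while loop: pop the last queue element, skip if visited, else add it and push its predecessors
def pvLoopA (reverseGraph : List (String × List String)) (U : List String)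
    (hU : ∀ room, ∀ x ∈ pvPreds reverseGraph room, x ∈ U)
    (S : PySem.Set String) (queue : List String) (hq : ∀ r ∈ queue, r ∈ U) : List String :=
  match queue with
  | [] => S
  | q :: qs =>
      let room := (q :: qs).getLast (List.cons_ne_nil q qs)
      if hmem : room ∈ S then
        pvLoopA reverseGraph U hU S ((q :: qs).dropLast)
          (fun r hr => hq r (List.dropLast_subset _ hr))
      else
        pvLoopA reverseGraph U hU (PySem.Set.add S room)
          ((q :: qs).dropLast ++ pvPreds reverseGraph room)
          (fun r hr => (List.mem_append.mp hr).elim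
            (fun h => hq r (List.dropLast_subset _ h))
            (fun h => hU room r h))
  termination_by ((U.filter (fun r => decide (r ∉ S))).length, queue.length)
  decreasing_by
  · exact Prod.Lex.right _ (by simp)
  · exact Prod.Lex.left _ _
      (pv_filter_add_lt U S _ (hq _ (List.getLast_mem _)) hmem)

def calculateReachableRoomsForDestination (destinationRoomName : String)
    (reverseGraph : List (String × List String)) : List String :=
  pvLoopA reverseGraph (pvU destinationRoomName reverseGraph)
    (fun room x hx => List.mem_cons_of_mem _ (pvPreds_sub reverseGraph room x hx))
    PySem.Set.empty [destinationRoomName]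
    (fun r hr => by rcases List.mem_singleton.mp hr with rfl; exact List.mem_cons_self)

-- ===== PORT B =====
-- B's recursive visit() over a list of rooms still to visit at this level; the subtype records
-- that the shared set only grows (needed for termination only)
def pvDfsB (reverseGraph : List (String × List String)) (U : List String)
    (hU : ∀ room, ∀ x ∈ pvPreds reverseGraph room, x ∈ U)
    (S : PySem.Set String) (rooms : List String) (hr : ∀ r ∈ rooms, r ∈ U) :
    {S' : PySem.Set String // ∀ x ∈ S, x ∈ S'} :=
  match rooms with
  | [] => ⟨S, fun _ h => h⟩
  | room :: rest =>
      if hmem : room ∈ S then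
        -- visit(room) returns immediately; continue with the remaining siblings
        pvDfsB reverseGraph U hU S rest (fun r h => hr r (List.mem_cons_of_mem _ h))
      else
        -- add room, recurse on its predecessors right-to-left, then the remaining siblings
        let S1 := pvDfsB reverseGraph U hU (PySem.Set.add S room)
          ((pvPreds reverseGraph room).reverse)
          (fun r h => hU room r (List.mem_reverse.mp h))
        let S2 := pvDfsB reverseGraph U hU S1.val rest
          (fun r h => hr r (List.mem_cons_of_mem _ h))
        ⟨S2.val, fun x hx =>
          S2.property x (S1.property x ((PySem.Set.mem_add _ _ _).mpr (Or.inl hx)))⟩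
  termination_by ((U.filter (fun r => decide (r ∉ S))).length, rooms.length)
  decreasing_by
  · exact Prod.Lex.right _ (by simp)
  · exact Prod.Lex.left _ _
      (pv_filter_add_lt U S _ (hr _ List.mem_cons_self) hmem)
  · have hle : (U.filter (fun r => decide (r ∉ S1.val))).length ≤
        (U.filter (fun r => decide (r ∉ S))).length := by
      refine pv_filter_le_of_sub U S S1.val ?_
      intro x hx
      exact S1.property x ((PySem.Set.mem_add _ _ _).mpr (Or.inl hx))
    rcases Nat.lt_or_ge (U.filter (fun r => decide (r ∉ S1.val))).length
        (U.filter (fun r => decide (r ∉ S))).length with hlt | hge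
    · exact Prod.Lex.left _ _ hlt
    · have : (U.filter (fun r => decide (r ∉ S1.val))).length =
          (U.filter (fun r => decide (r ∉ S))).length := Nat.le_antisymm hle hge
      rw [this]
      exact Prod.Lex.right _ (by simp)

def calculateReachableRoomsForDestination_alt (destinationRoomName : String)
    (reverseGraph : List (String × List String)) : List String :=
  (pvDfsB reverseGraph (pvU destinationRoomName reverseGraph)
    (fun room x hx => List.mem_cons_of_mem _ (pvPreds_sub reverseGraph room x hx))
    PySem.Set.empty [destinationRoomName]
    (fun r hr => by rcases List.mem_singleton.mp hr with rfl; exact List.mem_cons_self)).val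

-- ===== PRECONDITION & SPEC =====
def Spec_calculateReachableRoomsForDestination (destinationRoomName : String) (reverseGraph : List (String × List String)) (out : List String) : Prop := out = calculateReachableRoomsForDestination_alt destinationRoomName reverseGraph
instance (destinationRoomName : String) (reverseGraph : List (String × List String)) (out : List String) : Decidable (Spec_calculateReachableRoomsForDestination destinationRoomName reverseGraph out) := by unfold Spec_calculateReachableRoomsForDestination; infer_instance

-- ===== CLAIM (what is proved, stated in full; the proofs are below) =====
def Claim_equal_calculateReachableRoomsForDestination : Prop := ∀ (destinationRoomName : String) (reverseGraph : List (String × List String)), Dom_calculateReachableRoomsForDestination destinationRoomName reverseGraph → Spec_calculateReachableRoomsForDestination destinationRoomName reverseGraph (calculateReachableRoomsForDestination destinationRoomName reverseGraph)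

-- ===== LEMMAS AND PROOFS =====

-- unfolding equations and proof-irrelevance congruences for the two ports
theorem pvDfsB_congr (reverseGraph : List (String × List String)) (U : List String)
    (hU : ∀ room, ∀ x ∈ pvPreds reverseGraph room, x ∈ U) (S : PySem.Set String)
    (l1 l2 : List String) (h : l1 = l2)
    (h1 : ∀ r ∈ l1, r ∈ U) (h2 : ∀ r ∈ l2, r ∈ U) :
    (pvDfsB reverseGraph U hU S l1 h1).val = (pvDfsB reverseGraph U hU S l2 h2).val := by
  subst h; rfl

theorem pvDfsB_nil' (reverseGraph : List (String × List String)) (U : List String)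
    (hU : ∀ room, ∀ x ∈ pvPreds reverseGraph room, x ∈ U) (S : PySem.Set String)
    (l : List String) (hl : l = []) (h1 : ∀ r ∈ l, r ∈ U) :
    (pvDfsB reverseGraph U hU S l h1).val = S := by
  subst hl; rw [pvDfsB]

theorem pvDfsB_cons (reverseGraph : List (String × List String)) (U : List String)
    (hU : ∀ room, ∀ x ∈ pvPreds reverseGraph room, x ∈ U) (S : PySem.Set String)
    (room : String) (rest : List String) (h : ∀ r ∈ room :: rest, r ∈ U) :
    pvDfsB reverseGraph U hU S (room :: rest) h =
      if hmem : room ∈ S then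
        pvDfsB reverseGraph U hU S rest (fun r hh => h r (List.mem_cons_of_mem _ hh))
      else
        let S1 := pvDfsB reverseGraph U hU (PySem.Set.add S room)
          ((pvPreds reverseGraph room).reverse)
          (fun r hh => hU room r (List.mem_reverse.mp hh))
        let S2 := pvDfsB reverseGraph U hU S1.val rest
          (fun r hh => h r (List.mem_cons_of_mem _ hh))
        ⟨S2.val, fun x hx =>
          S2.property x (S1.property x ((PySem.Set.mem_add _ _ _).mpr (Or.inl hx)))⟩ := by
  rw [pvDfsB]

theorem pvLoopA_cons (reverseGraph : List (String × List String)) (U : List String)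
    (hU : ∀ room, ∀ x ∈ pvPreds reverseGraph room, x ∈ U) (S : PySem.Set String)
    (q : String) (qs : List String) (hq : ∀ r ∈ q :: qs, r ∈ U) :
    pvLoopA reverseGraph U hU S (q :: qs) hq =
      (if hmem : (q :: qs).getLast (List.cons_ne_nil q qs) ∈ S then
        pvLoopA reverseGraph U hU S ((q :: qs).dropLast)
          (fun r hr => hq r (List.dropLast_subset _ hr))
      else
        pvLoopA reverseGraph U hU (PySem.Set.add S ((q :: qs).getLast (List.cons_ne_nil q qs)))
          ((q :: qs).dropLast ++ pvPreds reverseGraph ((q :: qs).getLast (List.cons_ne_nil q qs)))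
          (fun r hr => (List.mem_append.mp hr).elim
            (fun h => hq r (List.dropLast_subset _ h))
            (fun h => hU _ r h))) := by
  rw [pvLoopA]

theorem pvDfsB_append (reverseGraph : List (String × List String)) (U : List String)
    (hU : ∀ room, ∀ x ∈ pvPreds reverseGraph room, x ∈ U) :
    ∀ (xs : List String) (S : PySem.Set String) (ys : List String)
      (hxs : ∀ r ∈ xs, r ∈ U) (hys : ∀ r ∈ ys, r ∈ U),
      (pvDfsB reverseGraph U hU S (xs ++ ys)
        (fun r h => (List.mem_append.mp h).elim (hxs r) (hys r))).val =
      (pvDfsB reverseGraph U hU (pvDfsB reverseGraph U hU S xs hxs).val ys hys).val := by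
  intro xs
  induction xs with
  | nil =>
      intro S ys hxs hys
      conv_rhs => rw [pvDfsB]
      exact pvDfsB_congr reverseGraph U hU S ([] ++ ys) ys rfl _ hys
  | cons r0 t ih =>
      intro S ys hxs hys
      rw [pvDfsB_congr reverseGraph U hU S ((r0 :: t) ++ ys) (r0 :: (t ++ ys))
            rfl _
            (fun r h => (List.mem_append.mp (show r ∈ (r0 :: t) ++ ys from h)).elim
              (hxs r) (hys r)),
          pvDfsB_cons, pvDfsB_cons]
      by_cases hmem : r0 ∈ S
      · rw [dif_pos hmem, dif_pos hmem]
        exact ih S ys (fun r h => hxs r (List.mem_cons_of_mem _ h)) hys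
      · rw [dif_neg hmem, dif_neg hmem]
        exact ih _ ys (fun r h => hxs r (List.mem_cons_of_mem _ h)) hys

theorem pvLoopA_eq (reverseGraph : List (String × List String)) (U : List String)
    (hU : ∀ room, ∀ x ∈ pvPreds reverseGraph room, x ∈ U) (n : Nat) :
    ∀ (m : Nat) (queue : List String) (S : PySem.Set String) (hq : ∀ r ∈ queue, r ∈ U),
      (U.filter (fun r => decide (r ∉ S))).length ≤ n → queue.length ≤ m →
      pvLoopA reverseGraph U hU S queue hq =
      (pvDfsB reverseGraph U hU S queue.reverse
        (fun r h => hq r (List.mem_reverse.mp h))).val := by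
  induction n with
  | zero =>
      intro m
      induction m with
      | zero =>
          intro queue S hq hn hm
          have : queue = [] := List.length_eq_zero_iff.mp (Nat.le_zero.mp hm)
          subst this
          rw [pvLoopA, pvDfsB_nil' reverseGraph U hU S (([] : List String).reverse) rfl]
      | succ m ihm =>
          intro queue S hq hn hm
          match queue with
          | [] => rw [pvLoopA, pvDfsB_nil' reverseGraph U hU S (([] : List String).reverse) rfl]
          | q :: qs =>
            have hne : (q :: qs) ≠ [] := List.cons_ne_nil q qs
            have hrev : (q :: qs).reverse =
                (q :: qs).getLast hne :: (q :: qs).dropLast.reverse := by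
              conv_lhs => rw [← List.dropLast_append_getLast hne]
              rw [List.reverse_append]; rfl
            by_cases hmem : (q :: qs).getLast hne ∈ S
            · rw [pvLoopA_cons]
              rw [dif_pos hmem]
              rw [ihm _ S _ hn (by simp [List.length_dropLast] at hm ⊢; omega)]
              rw [pvDfsB_congr reverseGraph U hU S _ _ hrev _
                    (fun r h => hq r (by
                      have := hrev ▸ h
                      exact List.mem_reverse.mp this)),
                  pvDfsB_cons]
              rw [dif_pos hmem]
            · exfalso
              have hfm : (q :: qs).getLast hne ∈
                  U.filter (fun r => decide (r ∉ S)) :=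
                List.mem_filter.mpr ⟨hq _ (List.getLast_mem hne), by simpa using hmem⟩
              have := List.length_pos_of_mem hfm
              omega
  | succ n ihn =>
      intro m
      induction m with
      | zero =>
          intro queue S hq hn hm
          have : queue = [] := List.length_eq_zero_iff.mp (Nat.le_zero.mp hm)
          subst this
          rw [pvLoopA, pvDfsB_nil' reverseGraph U hU S (([] : List String).reverse) rfl]
      | succ m ihm =>
          intro queue S hq hn hm
          match queue with
          | [] => rw [pvLoopA, pvDfsB_nil' reverseGraph U hU S (([] : List String).reverse) rfl]
          | q :: qs =>
            have hne : (q :: qs) ≠ [] := List.cons_ne_nil q qs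
            have hrev : (q :: qs).reverse =
                (q :: qs).getLast hne :: (q :: qs).dropLast.reverse := by
              conv_lhs => rw [← List.dropLast_append_getLast hne]
              rw [List.reverse_append]; rfl
            by_cases hmem : (q :: qs).getLast hne ∈ S
            · rw [pvLoopA_cons]
              rw [dif_pos hmem]
              rw [ihm _ S _ hn (by simp [List.length_dropLast] at hm ⊢; omega)]
              rw [pvDfsB_congr reverseGraph U hU S _ _ hrev _
                    (fun r h => hq r (by
                      have := hrev ▸ h
                      exact List.mem_reverse.mp this)),
                  pvDfsB_cons]
              rw [dif_pos hmem]
            · rw [pvLoopA_cons]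
              rw [dif_neg hmem]
              have hlt := pv_filter_add_lt U S _ (hq _ (List.getLast_mem hne)) hmem
              rw [ihn ((q :: qs).dropLast ++
                      pvPreds reverseGraph ((q :: qs).getLast hne)).length
                    _ _ _ (by omega) (Nat.le_refl _)]
              rw [pvDfsB_congr reverseGraph U hU _ _ _
                    (List.reverse_append
                      (as := (q :: qs).dropLast)
                      (bs := pvPreds reverseGraph ((q :: qs).getLast hne))) _
                    (fun r h => (List.mem_append.mp h).elim
                      (fun hh => hU _ r (List.mem_reverse.mp hh))
                      (fun hh => hq r (List.dropLast_subset _ (List.mem_reverse.mp hh))))]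
              rw [pvDfsB_append reverseGraph U hU ((pvPreds reverseGraph
                      ((q :: qs).getLast hne)).reverse) _ ((q :: qs).dropLast.reverse)
                    (fun r hh => hU _ r (List.mem_reverse.mp hh))
                    (fun r hh => hq r (List.dropLast_subset _ (List.mem_reverse.mp hh)))]
              rw [pvDfsB_congr reverseGraph U hU S _ _ hrev _
                    (fun r h => hq r (by
                      have := hrev ▸ h
                      exact List.mem_reverse.mp this)),
                  pvDfsB_cons]
              rw [dif_neg hmem]

-- ===== VERDICT (by name: the statement is the Claim_ definition above) =====
theorem calculateReachableRoomsForDestination_spec : Claim_equal_calculateReachableRoomsForDestination := by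
  intro d g _
  unfold Spec_calculateReachableRoomsForDestination
  unfold calculateReachableRoomsForDestination calculateReachableRoomsForDestination_alt
  rw [pvLoopA_eq _ _ _ _ _ [d] _ _ (Nat.le_refl _) (Nat.le_refl _)]
  rfl
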